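-- pv_equiv track=rewrite | github.com/lymchgmk/Algorithm-Problem-Solving | Programmers/연습문제/Level 2/이모티콘 할인행사/Solution.py | check
-- ===== SOURCE A (Python) =====
-- def check(users, emoticons, discounts):
--     subscribe = purchased_emoticons = 0
--     for discount_threshold, budget in users:
--         purchased = 0
--         for emoticon, discount in zip(emoticons, discounts):
--             if discount_threshold <= discount:
--                 purchased += emoticon * (100 - discount) // 100
--
--         if budget <= purchased:
--             subscribe += 1
--         else:
--             purchased_emoticons += purchased
--
--     return [subscribe, purchased_emoticons]
-- ===== SOURCE B (Python) =====
-- def check(users, emoticons, discounts):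
--     # precompute once: (discount, floored price) pairs sorted by discount and
--     # prefix sums of prices; answer each user by binary search on the discounts
--     pairs = sorted(((d, e * (100 - d) // 100) for e, d in zip(emoticons, discounts)),
--                    key=lambda p: p[0])
--     n = len(pairs)
--     prefix = [0]
--     run = 0
--     for _, p in pairs:
--         run += p
--         prefix.append(run)
--     subscribe = spending = 0
--     for threshold, budget in users:
--         lo, hi = 0, n
--         while lo < hi:
--             mid = (lo + hi) // 2
--             if pairs[mid][0] < threshold:
--                 lo = mid + 1
--             else:
--                 hi = mid
--         purchased = prefix[n] - prefix[lo]
--         if budget <= purchased: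
--             subscribe += 1
--         else:
--             spending += purchased
--     return [subscribe, spending]
-- ===== Notes on version B (the rewrite author's own statement) =====
-- stated objective: faster
-- what changed: Instead of rescanning all emoticons for every user, B sorts the (discount, floored price) pairs once, precomputes prefix sums of the prices, and answers each user with a binary search for the first discount >= threshold, reading the purchased amount off the prefix-sum array.
import Mathlib
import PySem

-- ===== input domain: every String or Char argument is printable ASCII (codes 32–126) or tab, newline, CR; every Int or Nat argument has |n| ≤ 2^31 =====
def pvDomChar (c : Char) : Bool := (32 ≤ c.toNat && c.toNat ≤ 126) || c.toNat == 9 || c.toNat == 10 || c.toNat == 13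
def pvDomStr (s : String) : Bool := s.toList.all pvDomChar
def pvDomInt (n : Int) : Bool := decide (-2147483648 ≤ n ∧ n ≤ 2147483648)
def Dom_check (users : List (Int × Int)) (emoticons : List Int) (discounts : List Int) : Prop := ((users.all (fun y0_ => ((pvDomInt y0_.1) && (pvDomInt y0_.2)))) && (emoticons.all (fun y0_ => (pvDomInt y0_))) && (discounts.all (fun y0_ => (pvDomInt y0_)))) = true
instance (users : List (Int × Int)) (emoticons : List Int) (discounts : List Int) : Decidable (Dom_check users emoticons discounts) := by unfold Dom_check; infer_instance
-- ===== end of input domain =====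

-- B replaces A's per-user rescan of all emoticons by a one-time sort of the
-- (discount, floored price) pairs plus prefix sums, answering each user with a
-- binary search (objective: faster).

-- ===== PORT A =====
def check (users : List (Int × Int)) (emoticons : List Int) (discounts : List Int) : List Int :=
  let res := users.foldl (fun (s : Int × Int) tb =>
      let purchased := (emoticons.zip discounts).foldl
        (fun acc ed =>
          if tb.1 ≤ ed.2 then acc + PySem.Int.floordiv (ed.1 * (100 - ed.2)) 100 else acc) 0
      if tb.2 ≤ purchased then (s.1 + 1, s.2) else (s.1, s.2 + purchased)) (0, 0)
  [res.1, res.2]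

-- ===== PORT B =====
-- Source B's while-loop binary search, ported with fuel ((hi - lo).toNat steps suffice)
def pvBsGo (pairs : List (Int × Int)) (t : Int) : Nat → Int → Int → Int
  | 0, lo, _ => lo
  | fuel + 1, lo, hi =>
    if lo < hi then
      let mid := PySem.Int.floordiv (lo + hi) 2
      if (PySem.List.pyGetD pairs mid (0, 0)).1 < t then pvBsGo pairs t fuel (mid + 1) hi
      else pvBsGo pairs t fuel lo mid
    else lo

def check_alt (users : List (Int × Int)) (emoticons : List Int) (discounts : List Int) : List Int :=
  let pairs := PySem.List.sorted
    ((emoticons.zip discounts).map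
      (fun ed => (ed.2, PySem.Int.floordiv (ed.1 * (100 - ed.2)) 100)))
    (fun p => p.1) false
  let n : Int := pairs.length
  let st := pairs.foldl
    (fun (s : Int × List Int) dp => (s.1 + dp.2, s.2 ++ [s.1 + dp.2])) (0, [0])
  let res := users.foldl (fun (s : Int × Int) tb =>
      let lo := pvBsGo pairs tb.1 n.toNat 0 n
      let purchased := PySem.List.pyGetD st.2 n 0 - PySem.List.pyGetD st.2 lo 0
      if tb.2 ≤ purchased then (s.1 + 1, s.2) else (s.1, s.2 + purchased)) (0, 0)
  [res.1, res.2]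

-- ===== PRECONDITION & SPEC =====
def Spec_check (users : List (Int × Int)) (emoticons : List Int) (discounts : List Int) (out : List Int) : Prop := out = check_alt users emoticons discounts
instance (users : List (Int × Int)) (emoticons : List Int) (discounts : List Int) (out : List Int) : Decidable (Spec_check users emoticons discounts out) := by unfold Spec_check; infer_instance

-- ===== CLAIM (what is proved, stated in full; the proofs are below) =====
def Claim_equal_check : Prop := ∀ (users : List (Int × Int)) (emoticons : List Int) (discounts : List Int), Dom_check users emoticons discounts → Spec_check users emoticons discounts (check users emoticons discounts)

-- ===== LEMMAS AND PROOFS =====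

-- the binary search returns a boundary index: every pair below it has
-- discount < t, every pair at or above it has discount ≥ t
theorem pvBsGo_spec (pairs : List (Int × Int)) (t : Int)
    (hsort : List.Pairwise (fun a b => a.1 ≤ b.1) pairs) :
    ∀ (fuel : Nat) (lo hi : Int), 0 ≤ lo → lo ≤ hi → hi ≤ pairs.length →
      (hi - lo).toNat ≤ fuel →
      (∀ i : Nat, (hlt : i < pairs.length) → (i : Int) < lo → pairs[i].1 < t) →
      (∀ i : Nat, (hlt : i < pairs.length) → hi ≤ (i : Int) → t ≤ pairs[i].1) →
      0 ≤ pvBsGo pairs t fuel lo hi ∧ pvBsGo pairs t fuel lo hi ≤ pairs.length ∧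
      (∀ i : Nat, (hlt : i < pairs.length) → (i : Int) < pvBsGo pairs t fuel lo hi → pairs[i].1 < t) ∧
      (∀ i : Nat, (hlt : i < pairs.length) → pvBsGo pairs t fuel lo hi ≤ (i : Int) → t ≤ pairs[i].1) := by
  have mono := List.pairwise_iff_getElem.mp hsort
  intro fuel
  induction fuel with
  | zero =>
    intro lo hi h0 hlh hhl hfuel hlow hhigh
    have heq : lo = hi := by omega
    subst heq
    exact ⟨h0, le_trans hlh hhl, hlow, hhigh⟩
  | succ fuel ih =>
    intro lo hi h0 hlh hhl hfuel hlow hhigh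
    by_cases hcase : lo < hi
    · have hmid := PySem.Int.floordiv_two_mid_bounds hlh
      have hmidlt : PySem.Int.floordiv (lo + hi) 2 < hi := by
        rw [PySem.Int.floordiv_lt_iff_lt_mul (by norm_num)]; omega
      set mid := PySem.Int.floordiv (lo + hi) 2 with hmiddef
      have h0m : 0 ≤ mid := le_trans h0 hmid.1
      have hmlen : mid < (pairs.length : Int) := lt_of_lt_of_le hmidlt hhl
      have hmlen' : mid.toNat < pairs.length := by omega
      have hget : PySem.List.pyGetD pairs mid (0, 0) = pairs[mid.toNat] :=
        PySem.List.pyGetD_eq_getElem _ _ h0m hmlen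
      simp only [pvBsGo, if_pos hcase, ← hmiddef, hget]
      by_cases hv : (pairs[mid.toNat]).1 < t
      · rw [if_pos hv]
        apply ih (mid + 1) hi (by omega) (by omega) hhl (by omega)
        · intro i hlt hi'
          rcases Nat.lt_or_ge i mid.toNat with h | h
          · exact lt_of_le_of_lt (mono i mid.toNat hlt hmlen' h) hv
          · have : i = mid.toNat := by omega
            subst this; exact hv
        · exact hhigh
      · rw [if_neg hv]
        apply ih lo mid h0 hmid.1 (le_of_lt hmlen) (by omega) hlow
        intro i hlt hi'
        have hv' : t ≤ (pairs[mid.toNat]).1 := not_lt.mp hv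
        rcases Nat.lt_or_ge mid.toNat i with h | h
        · exact le_trans hv' (mono mid.toNat i hmlen' hlt h)
        · have : i = mid.toNat := by omega
          subst this; exact hv'
    · have heq : lo = hi := by omega
      subst heq
      simp only [pvBsGo, if_neg hcase]
      exact ⟨h0, le_trans hlh hhl, hlow, hhigh⟩

-- Source B's prefix loop computes the running total and all prefix sums of the prices
theorem pvPrefixFold (l : List (Int × Int)) : ∀ (r : Int) (a : List Int),
    l.foldl (fun (s : Int × List Int) dp => (s.1 + dp.2, s.2 ++ [s.1 + dp.2])) (r, a)
    = (r + (l.map (·.2)).sum,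
       a ++ (List.range l.length).map (fun i => r + ((l.map (·.2)).take (i + 1)).sum)) := by
  induction l with
  | nil => intro r a; simp
  | cons hd tl ih =>
    intro r a
    simp only [List.foldl_cons, ih, List.map_cons, List.sum_cons, List.length_cons,
      List.range_succ_eq_map, List.map_map]
    refine Prod.ext (by simp; ring) ?_
    simp only [List.take_succ_cons, List.sum_cons, Function.comp_def, List.append_assoc]
    congr 1
    simp only [List.take_zero, List.sum_nil, List.singleton_append, add_zero]
    congr 1
    apply List.map_congr_left
    intro i _
    ring

-- per threshold: A's inner scan equals B's prefix-sum difference at the binary-search index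
theorem pvPurchased (emoticons discounts : List Int) (t : Int) :
    (emoticons.zip discounts).foldl
        (fun acc ed =>
          if t ≤ ed.2 then acc + PySem.Int.floordiv (ed.1 * (100 - ed.2)) 100 else acc) 0
    = PySem.List.pyGetD
        ((PySem.List.sorted ((emoticons.zip discounts).map
            (fun ed => (ed.2, PySem.Int.floordiv (ed.1 * (100 - ed.2)) 100))) (fun p => p.1) false).foldl
          (fun (s : Int × List Int) dp => (s.1 + dp.2, s.2 ++ [s.1 + dp.2])) (0, [0])).2
        ((PySem.List.sorted ((emoticons.zip discounts).map
            (fun ed => (ed.2, PySem.Int.floordiv (ed.1 * (100 - ed.2)) 100))) (fun p => p.1) false).length) 0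
      - PySem.List.pyGetD
        ((PySem.List.sorted ((emoticons.zip discounts).map
            (fun ed => (ed.2, PySem.Int.floordiv (ed.1 * (100 - ed.2)) 100))) (fun p => p.1) false).foldl
          (fun (s : Int × List Int) dp => (s.1 + dp.2, s.2 ++ [s.1 + dp.2])) (0, [0])).2
        (pvBsGo (PySem.List.sorted ((emoticons.zip discounts).map
            (fun ed => (ed.2, PySem.Int.floordiv (ed.1 * (100 - ed.2)) 100))) (fun p => p.1) false) t
          ((((PySem.List.sorted ((emoticons.zip discounts).map
            (fun ed => (ed.2, PySem.Int.floordiv (ed.1 * (100 - ed.2)) 100))) (fun p => p.1) false).length : Int)).toNat) 0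
          (((PySem.List.sorted ((emoticons.zip discounts).map
            (fun ed => (ed.2, PySem.Int.floordiv (ed.1 * (100 - ed.2)) 100))) (fun p => p.1) false).length : Int))) 0 := by
  set L := (emoticons.zip discounts).map
      (fun ed => (ed.2, PySem.Int.floordiv (ed.1 * (100 - ed.2)) 100)) with hL
  set pairs := PySem.List.sorted L (fun p => p.1) false with hpairs
  set ps := pairs.map (·.2) with hps
  -- 1. A's scan as a filtered sum over the unsorted pair list L
  have h1 : (emoticons.zip discounts).foldl
        (fun acc ed =>
          if t ≤ ed.2 then acc + PySem.Int.floordiv (ed.1 * (100 - ed.2)) 100 else acc) 0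
      = L.foldl (fun acc x => if t ≤ x.1 then acc + x.2 else acc) 0 := by
    rw [hL, List.foldl_map]
  rw [h1, PySem.List.foldl_ite_eq_foldl_filter (p := fun x : Int × Int => t ≤ x.1),
    PySem.List.foldl_add (g := fun x : Int × Int => x.2), zero_add]
  -- 2. the filtered sum is permutation-invariant, so move to the sorted list
  have hperm : pairs.Perm L := PySem.List.sorted_perm L (fun p => p.1) false
  rw [← List.Perm.sum_eq ((hperm.filter _).map _)]
  -- 3. the binary-search boundary
  have hsort : List.Pairwise (fun a b : Int × Int => a.1 ≤ b.1) pairs :=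
    PySem.List.sorted_pairwise L (fun p => p.1)
  obtain ⟨hr0, hrlen, hlt, hge⟩ := pvBsGo_spec pairs t hsort
    ((pairs.length : Int)).toNat 0 (pairs.length) (le_refl 0)
    (by positivity) (le_refl _) (by omega)
    (fun i hi h => absurd h (by omega))
    (fun i hi h => absurd h (by omega))
  set r := pvBsGo pairs t ((pairs.length : Int)).toNat 0 (pairs.length) with hr
  -- 4. on the sorted list the filter is a drop at the boundary
  have hfd : pairs.filter (fun x => decide (t ≤ x.1)) = pairs.drop r.toNat := by
    conv_lhs => rw [← List.take_append_drop r.toNat pairs]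
    rw [List.filter_append]
    have htake : (pairs.take r.toNat).filter (fun x => decide (t ≤ x.1)) = [] := by
      apply List.filter_eq_nil_iff.mpr
      intro x hx
      obtain ⟨i, hi, hxe⟩ := List.getElem_of_mem hx
      have hi' : i < pairs.length := by
        have := hi; simp [List.length_take] at this; omega
      rw [List.getElem_take] at hxe
      subst hxe
      have : (i : Int) < r := by
        have := hi; simp [List.length_take] at this; omega
      simp only [decide_eq_true_eq, not_le]
      exact hlt i hi' this
    have hdrop : (pairs.drop r.toNat).filter (fun x => decide (t ≤ x.1))
        = pairs.drop r.toNat := by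
      apply List.filter_eq_self.mpr
      intro x hx
      obtain ⟨i, hi, hxe⟩ := List.getElem_of_mem hx
      have hi' : r.toNat + i < pairs.length := by
        have := hi; simp [List.length_drop] at this; omega
      rw [List.getElem_drop] at hxe
      subst hxe
      simp only [decide_eq_true_eq]
      exact hge (r.toNat + i) hi' (by omega)
    rw [htake, hdrop, List.nil_append]
  rw [hfd]
  -- 5. the prefix array holds all prefix sums of the prices
  have hpre : (pairs.foldl
      (fun (s : Int × List Int) dp => (s.1 + dp.2, s.2 ++ [s.1 + dp.2])) (0, [0])).2
      = (List.range (pairs.length + 1)).map (fun k => (ps.take k).sum) := by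
    rw [pvPrefixFold]
    simp [List.range_succ_eq_map, List.map_map, Function.comp_def, hps]
  have hget : ∀ j : Int, 0 ≤ j → j ≤ (pairs.length : Int) →
      PySem.List.pyGetD (pairs.foldl
        (fun (s : Int × List Int) dp => (s.1 + dp.2, s.2 ++ [s.1 + dp.2])) (0, [0])).2 j 0
      = (ps.take j.toNat).sum := by
    intro j hj0 hjn
    rw [hpre, PySem.List.pyGetD_eq_getElem _ _ hj0
      (by simp [List.length_map, List.length_range]; omega)]
    rw [List.getElem_map, List.getElem_range]
  simp only [hget (pairs.length) (by positivity) (le_refl _), hget r hr0 hrlen]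
  have hsplit := List.sum_take_add_sum_drop ps r.toNat
  have hlen : ps.take (pairs.length : Int).toNat = ps := by
    simp [hps]
  rw [hlen, List.map_drop, ← hps]
  omega

-- ===== VERDICT (by name: the statement is the Claim_ definition above) =====
theorem check_spec : Claim_equal_check := by
  intro users emoticons discounts _
  unfold Spec_check
  simp only [check, check_alt]
  refine congrArg (fun r : Int × Int => [r.1, r.2]) ?_
  apply PySem.List.foldl_congr_mem
  intro acc tb _
  rw [pvPurchased emoticons discounts tb.1]
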